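-- pv_equiv track=rewrite | github.com/krishnaRajput21/Advance-TNP | Array_Problems/24_rearrange.py | rearrange_alternate
-- ===== SOURCE A (Python) =====
-- def rearrange_alternate(arr):
--     arr.sort()   # sorting
--
--     left = 0
--     right = len(arr) - 1
--     result = []
--
--     while left <= right:
--         if left != right:
--             result.append(arr[right])
--             result.append(arr[left])
--         else:
--             result.append(arr[left])
--
--         left += 1
--         right -= 1
--
--     return result
-- ===== SOURCE B (Python) =====
-- def rearrange_alternate(arr):
--     arr.sort()   # keep A's in-place sort side effect
--     mid = len(arr) // 2
--     low = arr[:mid]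
--     high = arr[mid:][::-1]
--     result = []
--     for h, l in zip(high, low):
--         result.append(h)
--         result.append(l)
--     if len(low) < len(high):
--         result.append(high[-1])
--     return result
-- ===== Notes on version B (the rewrite author's own statement) =====
-- stated objective: alternative
-- what changed: Replaces the two converging left/right pointers with a split of the sorted list into a low half and a reversed high half interleaved by a single zip pass (plus the leftover middle element when the length is odd).
import Mathlib
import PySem

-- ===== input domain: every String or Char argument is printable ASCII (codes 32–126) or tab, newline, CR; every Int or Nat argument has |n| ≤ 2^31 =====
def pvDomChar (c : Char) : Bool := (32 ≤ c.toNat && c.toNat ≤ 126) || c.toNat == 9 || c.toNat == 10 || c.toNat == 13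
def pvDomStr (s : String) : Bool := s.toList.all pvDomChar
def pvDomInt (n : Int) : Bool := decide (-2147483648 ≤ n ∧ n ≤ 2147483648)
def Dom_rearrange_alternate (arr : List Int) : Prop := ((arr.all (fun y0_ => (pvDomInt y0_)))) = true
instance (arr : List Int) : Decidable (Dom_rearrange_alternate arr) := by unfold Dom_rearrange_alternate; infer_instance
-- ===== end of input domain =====

-- B replaces A's two converging pointers by a split of the sorted list into halves and a
-- single zip interleave (objective: alternative decomposition, same O(n log n) cost).
-- Both A and B sort the argument in place (same side effect); the claim is about the return value.

-- ===== PORT A =====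
-- while left <= right: … (indices are always in range when read, so pyGetD's default is never used)
def pvLoopA (s : List Int) (left right : Int) (result : List Int) : List Int :=
  if left ≤ right then
    pvLoopA s (left + 1) (right - 1)
      (if left ≠ right
        then result ++ [PySem.List.pyGetD s right 0, PySem.List.pyGetD s left 0]
        else result ++ [PySem.List.pyGetD s left 0])
  else result
termination_by (right + 1 - left).toNat
decreasing_by omega

def rearrange_alternate (arr : List Int) : List Int :=
  let s := PySem.List.sorted arr id false     -- arr.sort()
  pvLoopA s 0 ((s.length : Int) - 1) []

-- ===== PORT B =====
def rearrange_alternate_alt (arr : List Int) : List Int :=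
  let s := PySem.List.sorted arr id false     -- arr.sort()
  let mid := PySem.Int.floordiv (s.length : Int) 2
  let low := PySem.List.slice s none (some mid)                                      -- arr[:mid]
  let high := (PySem.List.slice? (PySem.List.slice s (some mid) none) none none (-1)).getD []  -- arr[mid:][::-1]
  let result := (high.zip low).foldl (fun r p => r ++ [p.1, p.2]) []
  if (low.length : Int) < (high.length : Int)
    then result ++ [PySem.List.pyGetD high (-1) 0]                                   -- high[-1]
    else result

-- ===== PRECONDITION & SPEC =====
def Spec_rearrange_alternate (arr : List Int) (out : List Int) : Prop := out = rearrange_alternate_alt arr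
instance (arr : List Int) (out : List Int) : Decidable (Spec_rearrange_alternate arr out) := by unfold Spec_rearrange_alternate; infer_instance

-- ===== CLAIM (what is proved, stated in full; the proofs are below) =====
def Claim_equal_rearrange_alternate : Prop := ∀ (arr : List Int), Dom_rearrange_alternate arr → Spec_rearrange_alternate arr (rearrange_alternate arr)

-- ===== LEMMAS AND PROOFS =====

-- B's body applied to an arbitrary (already sorted) list, with Nat arithmetic
def Gb (t : List Int) : List Int :=
  let mid := t.length / 2
  let low := t.take mid
  let high := (t.drop mid).reverse
  let result := (high.zip low).flatMap (fun p => [p.1, p.2])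
  if low.length < high.length then result ++ [PySem.List.pyGetD high (-1) 0] else result

-- the segment arr[l .. r] (empty when r < l)
def segLR (s : List Int) (l r : Int) : List Int := (s.drop l.toNat).take ((r + 1 - l).toNat)

lemma alt_eq_Gb (arr : List Int) : rearrange_alternate_alt arr = Gb (PySem.List.sorted arr id false) := by
  have hmid : PySem.Int.floordiv (((PySem.List.sorted arr id false).length : Nat) : Int) 2
      = (((PySem.List.sorted arr id false).length / 2 : Nat) : Int) := by
    exact_mod_cast PySem.Int.floordiv_natCast (PySem.List.sorted arr id false).length 2
  unfold rearrange_alternate_alt Gb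
  simp only [hmid, PySem.List.slice_to_natCast, PySem.List.slice_from_natCast,
    PySem.List.slice?_none_none_neg_one, Option.getD_some,
    PySem.List.foldl_append_eq_flatMap, List.nil_append, Nat.cast_lt]

lemma Gb_single (x : Int) : Gb [x] = [x] := by
  simp [Gb, PySem.List.pyGetD_neg_one]

lemma Gb_step (x y : Int) (m : List Int) : Gb (x :: (m ++ [y])) = y :: x :: Gb m := by
  simp only [Gb]
  have h1 : (x :: (m ++ [y])).length / 2 = m.length / 2 + 1 := by simp; omega
  rw [h1]
  have h2 : (x :: (m ++ [y])).take (m.length / 2 + 1) = x :: m.take (m.length / 2) := by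
    simp [List.take_append_of_le_length (by omega : m.length / 2 ≤ m.length)]
  have h3 : ((x :: (m ++ [y])).drop (m.length / 2 + 1)).reverse
      = y :: (m.drop (m.length / 2)).reverse := by
    simp [List.drop_append_of_le_length (by omega : m.length / 2 ≤ m.length)]
  rw [h2, h3]
  split_ifs with hc1 hc2 hc3
  · have hne : (m.drop (m.length / 2)).reverse ≠ [] := by
      intro h; rw [h] at hc1; simp at hc1
    rw [PySem.List.pyGetD_neg_one _ 0 (by simp), PySem.List.pyGetD_neg_one _ 0 hne,
      List.getLast_cons hne]
    simp
  · simp at hc1 hc2; omega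
  · simp at hc1 hc3; omega
  · simp

lemma take_getD (t : List Int) (m : Nat) (h : m < t.length) :
    t.take (m + 1) = t.take m ++ [t.getD m 0] := by
  rw [List.take_add_one, List.getElem?_eq_getElem h]
  simp [List.getD_eq_getElem?_getD, List.getElem?_eq_getElem h]

lemma segLR_decomp (s : List Int) (l r : Int) (h0 : 0 ≤ l) (hlr : l < r) (hr : r < (s.length : Int)) :
    segLR s l r = s.getD l.toNat 0 :: (segLR s (l + 1) (r - 1) ++ [s.getD r.toNat 0]) := by
  have hl : l.toNat < s.length := by omega
  have hrn : r.toNat < s.length := by omega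
  unfold segLR
  rw [List.drop_eq_getElem_cons hl]
  have hk : (r + 1 - l).toNat = ((r - l).toNat - 1) + 1 + 1 := by omega
  rw [hk, List.take_succ_cons]
  have hm : (r - l).toNat - 1 < (s.drop (l.toNat + 1)).length := by
    simp; omega
  rw [take_getD _ _ hm]
  have e1 : (l + 1).toNat = l.toNat + 1 := by omega
  have e2 : (r - 1 + 1 - (l + 1)).toNat = (r - l).toNat - 1 := by omega
  rw [e1, e2]
  congr 1
  · exact (List.getD_eq_getElem s 0 hl).symm
  · congr 1
    rw [List.getD_eq_getElem?_getD, List.getD_eq_getElem?_getD, List.getElem?_drop]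
    have e3 : l.toNat + 1 + ((r - l).toNat - 1) = r.toNat := by omega
    rw [e3]


lemma loopA_acc (s : List Int) :
    ∀ k (l r : Int) (acc : List Int), (r + 1 - l).toNat = k →
      pvLoopA s l r acc = acc ++ pvLoopA s l r [] := by
  intro k
  induction k using Nat.strong_induction_on with
  | _ k ih =>
    intro l r acc hk
    rw [pvLoopA]
    conv_rhs => rw [pvLoopA]
    by_cases h : l ≤ r
    · rw [if_pos h, if_pos h]
      rw [ih ((r - 1) + 1 - (l + 1)).toNat (by omega) (l + 1) (r - 1) _ rfl,
          ih ((r - 1) + 1 - (l + 1)).toNat (by omega) (l + 1) (r - 1)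
            (if l ≠ r then [] ++ [PySem.List.pyGetD s r 0, PySem.List.pyGetD s l 0]
             else [] ++ [PySem.List.pyGetD s l 0]) rfl]
      split_ifs <;> simp
    · rw [if_neg h, if_neg h]; simp

lemma loopA_eq_Gb (s : List Int) :
    ∀ k (l r : Int), (r + 1 - l).toNat = k → 0 ≤ l → r < (s.length : Int) →
      pvLoopA s l r [] = Gb (segLR s l r) := by
  intro k
  induction k using Nat.strong_induction_on with
  | _ k ih =>
    intro l r hk h0 hr
    by_cases hle : l ≤ r
    · by_cases heq : l = r
      · subst heq
        rw [pvLoopA, if_pos hle, if_neg (by simp)]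
        rw [pvLoopA, if_neg (by omega)]
        have hlt : l.toNat < s.length := by omega
        have hseg : segLR s l l = [s.getD l.toNat 0] := by
          unfold segLR
          have h1 : (l + 1 - l).toNat = 0 + 1 := by omega
          rw [h1, List.drop_eq_getElem_cons hlt, List.take_succ_cons, List.take_zero,
            List.getD_eq_getElem s 0 hlt]
        rw [hseg, Gb_single, PySem.List.pyGetD_eq_getElem s 0 h0 hr,
          List.getD_eq_getElem s 0 hlt]
        simp
      · have hlt : l < r := by omega
        rw [pvLoopA, if_pos hle, if_pos heq]
        rw [loopA_acc s ((r - 1) + 1 - (l + 1)).toNat (l + 1) (r - 1) _ rfl]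
        rw [ih ((r - 1) + 1 - (l + 1)).toNat (by omega) (l + 1) (r - 1) rfl (by omega) (by omega)]
        rw [segLR_decomp s l r h0 hlt hr, Gb_step]
        rw [PySem.List.pyGetD_eq_getElem s 0 h0 (by omega),
            PySem.List.pyGetD_eq_getElem s 0 (by omega) hr,
            List.getD_eq_getElem s 0 (by omega : l.toNat < s.length),
            List.getD_eq_getElem s 0 (by omega : r.toNat < s.length)]
        simp
    · rw [pvLoopA, if_neg hle]
      have hseg : segLR s l r = [] := by
        unfold segLR
        have h1 : (r + 1 - l).toNat = 0 := by omega
        rw [h1, List.take_zero]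
      rw [hseg]
      rfl


-- ===== VERDICT (by name: the statement is the Claim_ definition above) =====
theorem rearrange_alternate_spec : Claim_equal_rearrange_alternate := by
  intro arr _
  unfold Spec_rearrange_alternate
  rw [alt_eq_Gb]
  set s := PySem.List.sorted arr id false with hs
  show pvLoopA s 0 ((s.length : Int) - 1) [] = Gb s
  have h := loopA_eq_Gb s ((s.length : Int) - 1 + 1 - 0).toNat 0 ((s.length : Int) - 1) rfl (by omega) (by omega)
  rw [h]
  congr 1
  simp [segLR]
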